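-- pv_equiv track=rewrite | github.com/grufghr/advent | advent2015/day14/puzzle.py | solve02
-- ===== SOURCE A (Python) =====
-- def solve02(input_data, seconds):
--     reindeer_stats = input_data
--
--     reindeer_dist = {r: 0 for r in reindeer_stats.keys()}
--     reindeer_score = {r: 0 for r in reindeer_stats.keys()}
--
--     for s in range(1, int(seconds)):
--         for r, stats_r in reindeer_stats.items():
--             reindeer_dist[r] = calc_dist(stats_r, s)
--
--         max_dist = max(reindeer_dist.values())
--         reindeer_lead = [r for r, d in reindeer_dist.items() if d == max_dist]
--         for r in reindeer_lead:
--             reindeer_score[r] += 1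
--
--     # max score by reindeer
--     max_score = max(reindeer_score.values())
--     return max_score
--
-- def calc_dist(stats_r, seconds):
--     cycle_t = stats_r[1] + stats_r[2]
--     cycles_d = seconds // cycle_t
--     cycles_m = seconds % cycle_t
--     dist_d = (stats_r[0] * stats_r[1]) * cycles_d
--
--     if cycles_m > stats_r[1]:
--         dist_m = stats_r[0] * stats_r[1]
--     else:
--         dist_m = stats_r[0] * cycles_m
--     dist = dist_d + dist_m
--     return dist
-- ===== SOURCE B (Python) =====
-- def solve02(input_data, seconds):
--     names = list(input_data)
--
--     def dist(name, s):
--         speed, fly, rest = input_data[name]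
--         q, m = s // (fly + rest), s % (fly + rest)
--         return speed * (fly * q + min(m, fly))
--
--     ticks = list(range(1, int(seconds)))
--     best = [max(dist(r, s) for r in names) for s in ticks]
--     return max(sum(1 for s, b in zip(ticks, best) if dist(r, s) == b) for r in names)
-- ===== Notes on version B (the rewrite author's own statement) =====
-- stated objective: simpler
-- what changed: A simulates second by second, mutating a running distance dict and a score dict and rebuilding the leader list each tick; B is a functional transposition: it precomputes the per-tick maximum distance once (using a min-based closed form for distance instead of A's branch), then computes each reindeer's score directly as a count of ticks it ties the maximum, with no dictionaries or mutation.
import Mathlib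
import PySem

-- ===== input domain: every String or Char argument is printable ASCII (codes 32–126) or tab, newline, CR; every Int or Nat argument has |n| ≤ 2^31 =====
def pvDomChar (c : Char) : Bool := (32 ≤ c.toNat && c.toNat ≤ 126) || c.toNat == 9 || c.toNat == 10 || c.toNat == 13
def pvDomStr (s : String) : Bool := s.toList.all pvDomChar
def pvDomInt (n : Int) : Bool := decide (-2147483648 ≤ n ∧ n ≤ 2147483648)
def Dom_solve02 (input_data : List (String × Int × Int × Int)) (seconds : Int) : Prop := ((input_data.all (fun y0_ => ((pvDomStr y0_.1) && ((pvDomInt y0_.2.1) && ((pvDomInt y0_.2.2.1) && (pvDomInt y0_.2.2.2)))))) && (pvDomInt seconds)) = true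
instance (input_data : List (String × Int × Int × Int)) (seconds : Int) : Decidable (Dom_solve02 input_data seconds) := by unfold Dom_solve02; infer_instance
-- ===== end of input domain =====

-- B replaces A's mutable dict simulation by a functional transposition (per-tick maxima once, then
-- per-reindeer tie counts); same value, no speed claim. Return-value equivalence only (A mutates no argument).

-- ===== PORT A =====
def pvCalcDist (stats_r : Int × Int × Int) (seconds : Int) : Int :=
  let cycle_t := stats_r.2.1 + stats_r.2.2
  let cycles_d := PySem.Int.floordiv seconds cycle_t   -- seconds // cycle_t; cycle_t ≠ 0 via Pre_
  let cycles_m := PySem.Int.mod seconds cycle_t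
  let dist_d := stats_r.1 * stats_r.2.1 * cycles_d
  let dist_m := if cycles_m > stats_r.2.1 then stats_r.1 * stats_r.2.1 else stats_r.1 * cycles_m
  dist_d + dist_m

def solve02 (input_data : List (String × Int × Int × Int)) (seconds : Int) : Int :=
  let reindeer_stats := input_data
  -- {r: 0 for r in reindeer_stats.keys()} (twice)
  let reindeer_dist : PySem.Dict String Int :=
    (reindeer_stats.map (·.1)).foldl (fun d r => d.insert r 0) PySem.Dict.empty
  let reindeer_score : PySem.Dict String Int :=
    (reindeer_stats.map (·.1)).foldl (fun d r => d.insert r 0) PySem.Dict.empty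
  let final := (PySem.List.pyRange 1 seconds 1).foldl
    (fun (st : PySem.Dict String Int × PySem.Dict String Int) s =>
      let dist := reindeer_stats.foldl (fun d p => d.insert p.1 (pvCalcDist p.2 s)) st.1
      -- max(reindeer_dist.values()): .getD 0 is unreachable, Pre_ excludes the empty dict
      let max_dist := (PySem.List.max? dist.values (fun x => x)).getD 0
      let lead := (dist.items.filter (fun q => q.2 == max_dist)).map (·.1)
      let score := lead.foldl (fun sc r => sc.modify r 0 (· + 1)) st.2
      (dist, score))
    (reindeer_dist, reindeer_score)
  (PySem.List.max? final.2.values (fun x => x)).getD 0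

-- ===== PORT B =====
def pvDist (input_data : List (String × Int × Int × Int)) (name : String) (s : Int) : Int :=
  -- input_data[name]: first-match lookup; .getD is unreachable (name always a key)
  let st := ((input_data.find? (fun p => p.1 == name)).map (·.2)).getD (0, 0, 0)
  let q := PySem.Int.floordiv s (st.2.1 + st.2.2)
  let m := PySem.Int.mod s (st.2.1 + st.2.2)
  st.1 * (st.2.1 * q + min m st.2.1)

def solve02_alt (input_data : List (String × Int × Int × Int)) (seconds : Int) : Int :=
  let names := input_data.map (·.1)
  let ticks := PySem.List.pyRange 1 seconds 1
  let best := ticks.map (fun s =>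
    (PySem.List.max? (names.map (fun r => pvDist input_data r s)) (fun x => x)).getD 0)
  (PySem.List.max? (names.map (fun r =>
      (((ticks.zip best).filter (fun q => pvDist input_data r q.1 == q.2)).length : Int)))
    (fun x => x)).getD 0

-- ===== PRECONDITION & SPEC =====
-- Pre_ excludes: the empty dict (A's max() raises ValueError); inputs where the loop runs and some
-- fly+rest = 0 (A raises ZeroDivisionError); and lists with duplicate names, which do not represent a
-- Python dict argument (the call boundary collapses them), so the association-list ports may diverge there.
def Pre_solve02 (input_data : List (String × Int × Int × Int)) (seconds : Int) : Prop :=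
  input_data ≠ [] ∧ (input_data.map (·.1)).Nodup ∧
    (1 < seconds → ∀ p ∈ input_data, p.2.2.1 + p.2.2.2 ≠ 0)
instance (input_data : List (String × Int × Int × Int)) (seconds : Int) : Decidable (Pre_solve02 input_data seconds) := by unfold Pre_solve02; infer_instance
def pvWitness_solve02 : (List (String × Int × Int × Int)) × Int := ([("a", 1, 2, 3), ("b", 2, 1, 4)], 5)

def Spec_solve02 (input_data : List (String × Int × Int × Int)) (seconds : Int) (out : Int) : Prop := out = solve02_alt input_data seconds
instance (input_data : List (String × Int × Int × Int)) (seconds : Int) (out : Int) : Decidable (Spec_solve02 input_data seconds out) := by unfold Spec_solve02; infer_instance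

-- ===== CLAIM (what is proved, stated in full; the proofs are below) =====
def Claim_equal_solve02 : Prop := ∀ (input_data : List (String × Int × Int × Int)) (seconds : Int), Dom_solve02 input_data seconds → Pre_solve02 input_data seconds → Spec_solve02 input_data seconds (solve02 input_data seconds)

-- ===== LEMMAS AND PROOFS =====

-- the per-second maximum distance and leader list, as A computes them, and A's loop body named
def pvMax (l : List (String × Int × Int × Int)) (s : Int) : Int :=
  (PySem.List.max? (l.map (fun p => pvCalcDist p.2 s)) (fun x => x)).getD 0

def pvLead (l : List (String × Int × Int × Int)) (s : Int) : List String :=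
  ((l.map (fun p => (p.1, pvCalcDist p.2 s))).filter (fun q => q.2 == pvMax l s)).map (·.1)

def pvStep (l : List (String × Int × Int × Int))
    (st : PySem.Dict String Int × PySem.Dict String Int) (s : Int) :
    PySem.Dict String Int × PySem.Dict String Int :=
  let dist := l.foldl (fun d p => d.insert p.1 (pvCalcDist p.2 s)) st.1
  let max_dist := (PySem.List.max? dist.values (fun x => x)).getD 0
  let lead := (dist.items.filter (fun q => q.2 == max_dist)).map (·.1)
  let score := lead.foldl (fun sc r => sc.modify r 0 (· + 1)) st.2
  (dist, score)

lemma pvFind?_eq {l : List (String × Int × Int × Int)}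
    (hnd : (l.map (·.1)).Nodup) {p} (hp : p ∈ l) :
    l.find? (fun q => q.1 == p.1) = some p := by
  induction l with
  | nil => simp at hp
  | cons a t ih =>
    simp only [List.map_cons, List.nodup_cons] at hnd
    rcases List.mem_cons.mp hp with h | h
    · subst h; simp
    · have hne : (a.1 == p.1) = false := by
        simp only [beq_eq_false_iff_ne]
        intro he
        exact hnd.1 (he ▸ List.mem_map_of_mem h)
      simp [hne, ih hnd.2 h]

lemma pvKeyInj {l : List (String × Int × Int × Int)}
    (hnd : (l.map (·.1)).Nodup) {p q} (hp : p ∈ l) (hq : q ∈ l) (h : p.1 = q.1) : p = q := by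
  have h1 := pvFind?_eq hnd hp
  have h2 := pvFind?_eq hnd hq
  rw [h] at h1
  rw [h1] at h2
  exact (Option.some_inj.mp h2)

lemma pvDist_eq {l : List (String × Int × Int × Int)}
    (hnd : (l.map (·.1)).Nodup) {p} (hp : p ∈ l) (s : Int) :
    pvDist l p.1 s = pvCalcDist p.2 s := by
  unfold pvDist pvCalcDist
  rw [pvFind?_eq hnd hp]
  simp only [Option.map_some, Option.getD_some]
  rcases lt_or_ge p.2.2.1 (PySem.Int.mod s (p.2.2.1 + p.2.2.2)) with h | h
  · rw [if_pos h, min_eq_right (le_of_lt h)]; ring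
  · rw [if_neg (not_lt.mpr h), min_eq_left h]; ring

lemma pvItemsOverwrite (f g : (String × Int × Int × Int) → Int) :
    ∀ (l : List (String × Int × Int × Int)) (pre : List (String × Int))
      (d : PySem.Dict String Int),
      d.items = pre ++ l.map (fun p => (p.1, g p)) →
      (l.map (·.1)).Nodup →
      (∀ k ∈ pre.map (·.1), k ∉ l.map (·.1)) →
      (l.foldl (fun d p => d.insert p.1 (f p)) d).items = pre ++ l.map (fun p => (p.1, f p)) := by
  intro l
  induction l with
  | nil => intro pre d hd _ _; simpa using hd
  | cons a t ih =>
    intro pre d hd hnd hdisj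
    simp only [List.map_cons, List.nodup_cons] at hnd
    have hcont : d.contains a.1 = true := by
      rw [PySem.Dict.contains_iff_mem_keys]
      show a.1 ∈ d.items.map (·.1)
      rw [hd]
      simp
    have hitems : (d.insert a.1 (f a)).items
        = (pre ++ [(a.1, f a)]) ++ t.map (fun p => (p.1, g p)) := by
      rw [PySem.Dict.items_insert, if_pos hcont, hd, List.append_assoc]
      simp only [List.singleton_append, List.map_append, List.map_cons, List.map_map]
      congr 1
      · have hpre : ∀ q ∈ pre, (if (q.1 == a.1) = true then (a.1, f a) else q) = id q := by
          intro q hq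
          have : (q.1 == a.1) = false := by
            simp only [beq_eq_false_iff_ne]
            intro he
            exact hdisj q.1 (List.mem_map_of_mem hq) (he ▸ by simp)
          simp [this]
        rw [List.map_congr_left hpre, List.map_id]
      · congr 1
        · simp
        · apply List.map_congr_left
          intro q hq
          have : (q.1 == a.1) = false := by
            simp only [beq_eq_false_iff_ne]
            intro he
            exact hnd.1 (he ▸ List.mem_map_of_mem hq)
          simp only [beq_eq_false_iff_ne] at this
          simp [this]
    simp only [List.foldl_cons]
    rw [ih (pre ++ [(a.1, f a)]) _ hitems hnd.2 ?_]
    · simp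
    · intro k hk
      simp only [List.map_append, List.mem_append] at hk
      rcases hk with hk | hk
      · intro hmem; exact hdisj k hk (List.mem_cons_of_mem _ hmem)
      · simp only [List.map_cons, List.map_nil, List.mem_singleton] at hk
        subst hk
        exact hnd.1

lemma pvLead_nodup {l : List (String × Int × Int × Int)}
    (hnd : (l.map (·.1)).Nodup) (s : Int) : (pvLead l s).Nodup := by
  unfold pvLead
  have hsub : List.Sublist (((l.map (fun p => (p.1, pvCalcDist p.2 s))).filter
      (fun q => q.2 == pvMax l s)).map (·.1)) ((l.map (fun p => (p.1, pvCalcDist p.2 s))).map (·.1)) :=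
    ((l.map (fun p => (p.1, pvCalcDist p.2 s))).filter_sublist).map (·.1)
  have : (l.map (fun p => (p.1, pvCalcDist p.2 s))).map (·.1) = l.map (·.1) := by
    simp [List.map_map]
  exact List.Nodup.sublist (this ▸ hsub) hnd

lemma pvLead_subset {l : List (String × Int × Int × Int)} {s : Int} {r : String}
    (hr : r ∈ pvLead l s) : r ∈ l.map (·.1) := by
  unfold pvLead at hr
  rcases List.mem_map.mp hr with ⟨q, hq, hq1⟩
  rcases List.mem_map.mp (List.mem_of_mem_filter hq) with ⟨p, hp, hpq⟩
  subst hq1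
  rw [← hpq]
  exact List.mem_map_of_mem hp

lemma pvMem_lead {l : List (String × Int × Int × Int)}
    (hnd : (l.map (·.1)).Nodup) {p} (hp : p ∈ l) (s : Int) :
    p.1 ∈ pvLead l s ↔ pvCalcDist p.2 s = pvMax l s := by
  unfold pvLead
  constructor
  · intro h
    rcases List.mem_map.mp h with ⟨q, hq, hq1⟩
    rcases List.mem_filter.mp hq with ⟨hq2, hq3⟩
    rcases List.mem_map.mp hq2 with ⟨p', hp', hpq⟩
    subst hpq
    have : p' = p := pvKeyInj hnd hp' hp (by simpa using hq1)
    subst this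
    simpa using hq3
  · intro h
    apply List.mem_map.mpr
    refine ⟨(p.1, pvCalcDist p.2 s), ?_, rfl⟩
    apply List.mem_filter.mpr
    exact ⟨List.mem_map_of_mem hp, by simpa using h⟩

lemma pvLoop {l : List (String × Int × Int × Int)} (hnd : (l.map (·.1)).Nodup)
    (ss : List Int) :
    ∀ (g : (String × Int × Int × Int) → Int) (d sc : PySem.Dict String Int),
      d.items = l.map (fun p => (p.1, g p)) →
      sc.keys = l.map (·.1) →
      (ss.foldl (pvStep l) (d, sc)).2.keys = l.map (·.1) ∧
      ∀ r, (ss.foldl (pvStep l) (d, sc)).2.getD r 0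
            = sc.getD r 0 + (ss.countP (fun s => decide (r ∈ pvLead l s)) : Int) := by
  induction ss with
  | nil => intro g d sc hd hsc; exact ⟨hsc, by simp⟩
  | cons s t ih =>
    intro g d sc hd hsc
    have hdist : (l.foldl (fun d p => d.insert p.1 (pvCalcDist p.2 s)) d).items
        = l.map (fun p => (p.1, pvCalcDist p.2 s)) :=
      pvItemsOverwrite _ g l [] d (by simpa using hd) hnd (by simp)
    have hstep : pvStep l (d, sc) s
        = (l.foldl (fun d p => d.insert p.1 (pvCalcDist p.2 s)) d,
           (pvLead l s).foldl (fun sc r => sc.modify r 0 (· + 1)) sc) := by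
      unfold pvStep pvLead pvMax
      simp only [PySem.Dict.values, hdist, List.map_map]
      rfl
    have hsc' : ((pvLead l s).foldl (fun sc r => sc.modify r 0 (· + 1)) sc).keys
        = l.map (·.1) := by
      rw [PySem.Dict.keys_foldl_modify, hsc, PySem.Set.update_eq_append_filter]
      have : ((PySem.Set.ofList (pvLead l s)).filter
          (fun y => !(PySem.Set.contains (l.map (·.1)) y))) = [] := by
        apply List.filter_eq_nil_iff.mpr
        intro y hy
        have : y ∈ l.map (·.1) :=
          pvLead_subset ( (PySem.List.mem_dedup _ _).mp hy)
        simp [this]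
      rw [this, List.append_nil]
    simp only [List.foldl_cons, hstep]
    obtain ⟨hk, hgetD⟩ := ih (fun p => pvCalcDist p.2 s) _ _ hdist hsc'
    refine ⟨hk, fun r => ?_⟩
    rw [hgetD r, PySem.Dict.getD_foldl_modify_add_one]
    by_cases hr : r ∈ pvLead l s
    · rw [List.count_eq_one_of_mem (pvLead_nodup hnd s) hr]
      simp only [List.countP_cons, hr, decide_true, if_true]
      push_cast
      ring
    · rw [List.count_eq_zero_of_not_mem hr]
      simp only [List.countP_cons, hr, decide_false]
      push_cast
      ring

lemma pvMain (l : List (String × Int × Int × Int)) (t : Int)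
    (hnd : (l.map (·.1)).Nodup) : solve02 l t = solve02_alt l t := by
  -- the zero dict
  set names := l.map (·.1) with hnames
  have hd0 : ((names.foldl (fun d r => d.insert r 0) PySem.Dict.empty) : PySem.Dict String Int).items
      = l.map (fun p => (p.1, (0:Int))) := by
    rw [PySem.Dict.items_foldl_insert_fresh names (fun r => r) (fun _ => (0:Int))
        PySem.Dict.empty (by simp) (by simpa using hnd)]
    simp [hnames, List.map_map, Function.comp, PySem.Dict.empty]
  set d0 : PySem.Dict String Int := names.foldl (fun d r => d.insert r 0) PySem.Dict.empty with hd0def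
  have hkeys0 : d0.keys = names := by
    show d0.items.map (·.1) = names
    rw [hd0]; simp [hnames, List.map_map]
  have hgetD0 : ∀ p ∈ l, d0.getD p.1 0 = 0 := by
    intro p hp
    exact PySem.Dict.getD_of_mem_items d0 (by rw [hd0]; exact List.mem_map_of_mem hp)
      (by rw [hkeys0]; exact hnd) 0
  -- run the loop
  set ticks := PySem.List.pyRange 1 t 1 with hticks
  obtain ⟨hkeysF, hgetDF⟩ := pvLoop hnd ticks (fun _ => 0) d0 d0 hd0 hkeys0
  have hndF : ((ticks.foldl (pvStep l) (d0, d0)).2).keys.Nodup := by rw [hkeysF]; exact hnd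
  -- A's final values list
  have hvalsA : ((ticks.foldl (pvStep l) (d0, d0)).2).values
      = l.map (fun p => (ticks.countP (fun s => decide (p.1 ∈ pvLead l s)) : Int)) := by
    rw [PySem.Dict.values_eq_map_keys _ hndF 0, hkeysF]
    rw [List.map_map]
    apply List.map_congr_left
    intro p hp
    simp only [Function.comp]
    rw [hgetDF, hgetD0 p hp, zero_add]
  -- B's best list is the pvMax list
  have hbest : ticks.map (fun s =>
        (PySem.List.max? (names.map (fun r => pvDist l r s)) (fun x => x)).getD 0)
      = ticks.map (fun s => pvMax l s) := by
    apply List.map_congr_left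
    intro s _
    have : names.map (fun r => pvDist l r s) = l.map (fun p => pvCalcDist p.2 s) := by
      rw [hnames, List.map_map]
      exact List.map_congr_left (fun p hp => pvDist_eq hnd hp s)
    rw [this]; rfl
  -- B's count for each r
  have hcnt : ∀ p ∈ l,
      (((ticks.zip (ticks.map (fun s => pvMax l s))).filter
          (fun q => pvDist l p.1 q.1 == q.2)).length : Int)
        = (ticks.countP (fun s => decide (p.1 ∈ pvLead l s)) : Int) := by
    intro p hp
    have hzip : ticks.zip (ticks.map (fun s => pvMax l s))
        = ticks.map (fun s => (s, pvMax l s)) := by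
      simpa using (List.zip_map' (f := id) (g := fun s => pvMax l s) (l := ticks))
    rw [hzip, List.filter_map, List.length_map, ← List.countP_eq_length_filter]
    congr 1
    apply List.countP_congr
    intro s _
    simp only [Function.comp]
    rw [pvDist_eq hnd hp s]
    constructor
    · intro h
      exact decide_eq_true ((pvMem_lead hnd hp s).mpr (by simpa using h))
    · intro h
      exact beq_iff_eq.mpr ((pvMem_lead hnd hp s).mp (of_decide_eq_true h))
  -- assemble
  show (PySem.List.max? ((ticks.foldl (pvStep l) (d0, d0)).2).values (fun x => x)).getD 0
      = (PySem.List.max? (names.map (fun r =>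
          (((ticks.zip (ticks.map (fun s =>
            (PySem.List.max? (names.map (fun r' => pvDist l r' s)) (fun x => x)).getD 0))).filter
              (fun q => pvDist l r q.1 == q.2)).length : Int))) (fun x => x)).getD 0
  rw [hbest, hvalsA]
  congr 2
  rw [hnames, List.map_map]
  apply List.map_congr_left
  intro p hp
  simp only [Function.comp]
  exact (hcnt p hp).symm


-- ===== VERDICT (by name: the statement is the Claim_ definition above) =====
theorem solve02_spec : Claim_equal_solve02 := by
  intro input_data seconds _ hpre
  unfold Spec_solve02
  exact pvMain input_data seconds hpre.2.1
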